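-- pv_equiv track=rewrite | github.com/fwoggywan/Semestre-2 | Semestre-2-main/TP_python_S2/TPPOO/Poo_python/S01_TP01_template.py | get_molar_mass
-- ===== SOURCE A (Python) =====
-- def are_chars(chars, string):
--     """ Retourne 'True' si tous les caractères 'chars' appartiennent la chaine 'string'.
--     False sinon."""
--     if chars == '':
--         return False
--     for lettre in chars:
--         if lettre not in string:
--             return False
--     return True
--
-- def is_dna(dna):
--     """ Retourne 'True' si le brin 'dna' contient uniquement des bases A, T, G ou C (et au moins une).
--     'False' sinon. Il faudra utiliser la fonction 'are_chars'."""
--     return are_chars(dna.upper(), "ATGC")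
--
-- def get_molar_mass(dna):
--     """ Retourne 0 si dna n'est pas un brin. Sinon, retourne la masse molaire du brin 'dna'.
--     Il faudra utiliser la fonction 'is_dna'."""
--     if is_dna(dna) == False :
--         return 0
--     dico = {'A' : 135 , 'T' : 126 , 'G' : 151 , 'C' : 111}
--     total = 0
--     for elt in dna :
--         total += dico[elt]
--     return total
-- ===== SOURCE B (Python) =====
-- def get_molar_mass(dna):
--     """Frequency-table version: build a count of each character once, validate the
--     distinct characters, then take a weighted sum count * mass per distinct base."""
--     MASS = {'A': 135, 'T': 126, 'G': 151, 'C': 111}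
--     counts = {}
--     for ch in dna:
--         counts[ch] = counts.get(ch, 0) + 1
--     if not counts or any(base.upper() not in MASS for base in counts):
--         return 0
--     return sum(cnt * MASS[base] for base, cnt in counts.items())
-- ===== Notes on version B (the rewrite author's own statement) =====
-- stated objective: alternative
-- what changed: B builds a frequency table of the characters in one pass and computes the mass as a weighted sum count*mass over the distinct bases (also validating the distinct keys), instead of A's validate-then-per-character accumulation.
import Mathlib
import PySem

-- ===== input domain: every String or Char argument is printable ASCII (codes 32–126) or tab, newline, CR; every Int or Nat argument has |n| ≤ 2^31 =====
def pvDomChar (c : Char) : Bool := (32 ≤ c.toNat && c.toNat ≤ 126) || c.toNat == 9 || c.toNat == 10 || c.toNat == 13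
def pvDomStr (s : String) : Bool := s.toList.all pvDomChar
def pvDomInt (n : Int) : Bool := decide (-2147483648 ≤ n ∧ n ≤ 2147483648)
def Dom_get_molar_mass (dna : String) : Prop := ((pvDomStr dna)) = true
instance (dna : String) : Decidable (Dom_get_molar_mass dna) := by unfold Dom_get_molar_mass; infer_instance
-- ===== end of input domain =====

-- B computes the molar mass as a weighted sum over a frequency table of the distinct
-- bases instead of A's per-character accumulation; objective: alternative algorithm.


-- ===== PORT A =====
-- 'lettre in string' for a single character is character membership
def pvAreChars (chars string : String) : Bool :=
  if chars.toList = [] then false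
  else chars.toList.all (fun lettre => decide (lettre ∈ string.toList))

def pvIsDna (dna : String) : Bool := pvAreChars (PySem.Str.upper dna) "ATGC"

def pvDicoA : PySem.Dict Char Int :=
  PySem.Dict.ofList [('A', 135), ('T', 126), ('G', 151), ('C', 111)]

-- dico[elt] raises KeyError on a key outside the dict; Pre_ excludes those inputs,
-- so the total form getD with default 0 is exact under Pre_.
def get_molar_mass (dna : String) : Int :=
  if pvIsDna dna = false then 0
  else dna.toList.foldl (fun total elt => total + pvDicoA.getD elt 0) 0

-- ===== PORT B =====
def pvMassB : PySem.Dict Char Int :=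
  PySem.Dict.ofList [('A', 135), ('T', 126), ('G', 151), ('C', 111)]

-- MASS[base] raises KeyError on a key outside the dict; under Pre_ the lookup always
-- succeeds, so getD 0 is exact.
def get_molar_mass_alt (dna : String) : Int :=
  let counts := PySem.Dict.counter dna.toList
  if counts.keys = [] ∨ counts.keys.any (fun base => !(pvMassB.contains (PySem.Chars.upperChar base))) then 0
  else counts.items.foldl (fun tot p => tot + p.2 * pvMassB.getD p.1 0) 0

-- ===== PRECONDITION & SPEC =====
-- Pre_ excludes exactly the inputs where A (and B alike) raises KeyError: strands that
-- pass the uppercased validation but contain a character that is not an uppercase base.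
def Pre_get_molar_mass (dna : String) : Prop :=
  dna.toList.all (fun c => decide (c ∈ ['A', 'T', 'G', 'C'])) = true ∨
  ¬ (dna.toList.all (fun c => decide (PySem.Chars.upperChar c ∈ ['A', 'T', 'G', 'C'])) = true)
instance (dna : String) : Decidable (Pre_get_molar_mass dna) := by
  unfold Pre_get_molar_mass; infer_instance

def pvWitness_get_molar_mass : String := "GATTACA"

def Spec_get_molar_mass (dna : String) (out : Int) : Prop := out = get_molar_mass_alt dna
instance (dna : String) (out : Int) : Decidable (Spec_get_molar_mass dna out) := by unfold Spec_get_molar_mass; infer_instance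

-- ===== CLAIM (what is proved, stated in full; the proofs are below) =====
def Claim_equal_get_molar_mass : Prop := ∀ (dna : String), Dom_get_molar_mass dna → Pre_get_molar_mass dna → Spec_get_molar_mass dna (get_molar_mass dna)

-- ===== LEMMAS AND PROOFS =====

theorem sum_map_ite_self (f : Char → Int) :
    ∀ (u : List Char) (c : Char), u.Nodup → c ∈ u →
    ((u.map (fun k => if k = c then f c else 0)).sum) = f c := by
  intro u
  induction u with
  | nil => intro c _ hc; cases hc
  | cons a t ih =>
    intro c hu hc
    simp only [List.map_cons, List.sum_cons]
    by_cases h : a = c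
    · subst h
      have ha : a ∉ t := (List.nodup_cons.mp hu).1
      have hz : (t.map (fun k => if k = a then f a else 0)).sum = 0 := by
        apply List.sum_eq_zero
        intro x hx
        rcases List.mem_map.mp hx with ⟨k, hk, rfl⟩
        have hka : k ≠ a := fun e => ha (e ▸ hk)
        simp [hka]
      simp [hz]
    · have hct : c ∈ t := by
        rcases List.mem_cons.mp hc with e | ht
        · exact absurd e.symm h
        · exact ht
      rw [if_neg h, ih c (List.nodup_cons.mp hu).2 hct]
      ring

theorem weighted_sum_eq (f : Char → Int) (u l : List Char)
    (hu : u.Nodup) (hsub : ∀ c ∈ l, c ∈ u) :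
    (u.map (fun k => (l.count k : Int) * f k)).sum = (l.map f).sum := by
  induction l with
  | nil => simp
  | cons c t ih =>
    have hsub' : ∀ x ∈ t, x ∈ u := fun x hx => hsub x (List.mem_cons_of_mem _ hx)
    have split : ∀ k : Char,
        ((c :: t).count k : Int) * f k
          = (t.count k : Int) * f k + (if k = c then f c else 0) := by
      intro k
      rw [List.count_cons]
      by_cases h : k = c
      · subst h; simp; ring
      · simp [h]
        exact Or.inl (fun e => h e.symm)
    calc (u.map (fun k => ((c :: t).count k : Int) * f k)).sum
        = (u.map (fun k => (t.count k : Int) * f k + (if k = c then f c else 0))).sum := by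
          congr 1; exact List.map_congr_left (fun k _ => split k)
      _ = (u.map (fun k => (t.count k : Int) * f k)).sum
            + (u.map (fun k => if k = c then f c else 0)).sum := by
          rw [← List.sum_map_add]
      _ = (t.map f).sum + f c := by
          rw [ih hsub', sum_map_ite_self f u c hu (hsub c (List.mem_cons_self))]
      _ = ((c :: t).map f).sum := by simp; ring

theorem massB_eq_dicoA : pvMassB = pvDicoA := rfl

theorem keys_massB : pvMassB.keys = ['A', 'T', 'G', 'C'] := by decide

theorem contains_massB (c : Char) :
    pvMassB.contains c = decide (c ∈ ['A', 'T', 'G', 'C']) := by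
  rw [PySem.Dict.contains_eq_decide_mem_keys, keys_massB]

-- validity conditions of A and B coincide
theorem valid_iff (dna : String) :
    pvIsDna dna = true ↔
      dna.toList ≠ [] ∧ ∀ c ∈ dna.toList, PySem.Chars.upperChar c ∈ ['A', 'T', 'G', 'C'] := by
  unfold pvIsDna pvAreChars
  constructor
  · intro h
    by_cases hnil : (PySem.Str.upper dna).toList = []
    · rw [if_pos hnil] at h; cases h
    · rw [if_neg hnil] at h
      have hall := List.all_eq_true.mp h
      have hmap : (PySem.Str.upper dna).toList = dna.toList.map PySem.Chars.upperChar := by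
        simp [PySem.Str.upper, PySem.Chars.upper]
      constructor
      · intro hd; apply hnil; rw [hmap, hd]; rfl
      · intro c hc
        have := hall (PySem.Chars.upperChar c) (by rw [hmap]; exact List.mem_map_of_mem hc)
        have := of_decide_eq_true this
        simpa using this
  · rintro ⟨hne, hall⟩
    have hmap : (PySem.Str.upper dna).toList = dna.toList.map PySem.Chars.upperChar := by
      simp [PySem.Str.upper, PySem.Chars.upper]
    have hnil : (PySem.Str.upper dna).toList ≠ [] := by
      rw [hmap]; simpa using hne
    rw [if_neg hnil]
    apply List.all_eq_true.mpr
    intro x hx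
    rw [hmap] at hx
    rcases List.mem_map.mp hx with ⟨c, hc, rfl⟩
    have := hall c hc
    simpa using this

-- ===== VERDICT (by name: the statement is the Claim_ definition above) =====
theorem get_molar_mass_spec : Claim_equal_get_molar_mass := by
  intro dna _ hpre
  unfold Spec_get_molar_mass
  unfold get_molar_mass get_molar_mass_alt
  set l := dna.toList with hl
  have hkeys : (PySem.Dict.counter l).keys = PySem.Set.ofList l := PySem.Dict.keys_counter l
  by_cases hv : pvIsDna dna = true
  · -- valid strand: nonempty and every uppercased char is a base
    rcases (valid_iff dna).mp hv with ⟨hne, hallup⟩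
    -- under Pre_, every character itself is an uppercase base
    have hall : ∀ c ∈ l, c ∈ ['A', 'T', 'G', 'C'] := by
      rcases hpre with h | h
      · intro c hc; exact of_decide_eq_true (List.all_eq_true.mp h c hc)
      · exfalso; apply h; apply List.all_eq_true.mpr
        intro c hc; exact decide_eq_true (hallup c hc)
    -- B's guard is false
    have hguard : ¬ ((PySem.Dict.counter l).keys = [] ∨
        (PySem.Dict.counter l).keys.any
          (fun base => !(pvMassB.contains (PySem.Chars.upperChar base)))) := by
      rw [hkeys]
      rintro (h | h)
      · cases hcl : l with
        | nil => exact hne (by rw [← hl]; exact hcl)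
        | cons a t =>
            have hmem : a ∈ PySem.Set.ofList l :=
              (PySem.Set.mem_ofList _ _).mpr (by rw [hcl]; exact List.mem_cons_self)
            rw [h] at hmem; cases hmem
      · rcases List.any_eq_true.mp h with ⟨base, hb, hbad⟩
        have hbase : base ∈ l := (PySem.Set.mem_ofList _ _).mp hb
        rw [contains_massB] at hbad
        simp at hbad
        have hmem := hallup base hbase
        simp at hmem
        tauto
    rw [if_neg (by simp [hv]), if_neg hguard]
    -- both sides as sums
    have hA : l.foldl (fun total elt => total + pvDicoA.getD elt 0) 0
        = (l.map (fun c => pvDicoA.getD c 0)).sum := by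
      rw [PySem.List.foldl_add]; simp
    have hitems := PySem.Dict.items_counter l
    rw [hA, hitems]
    rw [List.foldl_map]
    have hB : (PySem.Set.ofList l).foldl
        (fun tot k => tot + (l.count k : Int) * pvMassB.getD k 0) 0
        = ((PySem.Set.ofList l).map (fun k => (l.count k : Int) * pvMassB.getD k 0)).sum := by
      rw [PySem.List.foldl_add]; simp
    rw [hB, massB_eq_dicoA]
    exact (weighted_sum_eq (fun c => pvDicoA.getD c 0) (PySem.Set.ofList l) l
      (PySem.Set.nodup_ofList l) (fun c hc => (PySem.Set.mem_ofList _ _).mpr hc)).symm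
  · -- not a strand: both return 0
    have hv' : pvIsDna dna = false := by
      cases h : pvIsDna dna
      · rfl
      · exact absurd h hv
    rw [if_pos (by simp [hv'])]
    have hguard : (PySem.Dict.counter l).keys = [] ∨
        (PySem.Dict.counter l).keys.any
          (fun base => !(pvMassB.contains (PySem.Chars.upperChar base))) := by
      rw [hkeys]
      by_cases hnil : l = []
      · left; rw [hnil]; rfl
      · right
        rw [List.any_eq_true]
        -- invalid and nonempty: some character's uppercase is not a base
        have : ¬ ∀ c ∈ l, PySem.Chars.upperChar c ∈ ['A', 'T', 'G', 'C'] := by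
          intro hcontra
          exact hv ((valid_iff dna).mpr ⟨hnil, hcontra⟩)
        push Not at this
        rcases this with ⟨c, hc, hnot⟩
        exact ⟨c, (PySem.Set.mem_ofList _ _).mpr hc, by simp [contains_massB, hnot]⟩
    rw [if_pos hguard]
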